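-- pv_equiv track=rewrite | github.com/MrBrantCode/unitest_baseline | mut_generate/mist_train_taco/taco_10393/solution.py | max_right_moves
-- ===== SOURCE A (Python) =====
-- def max_right_moves(N: int, H: list) -> int:
--     """
--     Calculate the maximum number of times you can move to the right in a row of squares
--     where the height of the next square is not greater than that of the current square.
--
--     Parameters:
--     N (int): The number of squares.
--     H (list): A list of integers representing the height of each square.
--
--     Returns:
--     int: The maximum number of times you can move to the right.
--     """
--     ans = 0
--     x = 0
--     for i in range(N - 1):
--         if H[i] >= H[i + 1]:
--             x += 1
--             ans = max(ans, x)
--         else: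
--             x = 0
--     return ans
-- ===== SOURCE B (Python) =====
-- def max_right_moves(N: int, H: list) -> int:
--     # Two-phase decomposition: table of adjacent comparisons, then group
--     # consecutive equal values into runs and take the longest True run.
--     b = [H[i] >= H[i + 1] for i in range(N - 1)]
--     runs = []  # run-length encoding of b: list of (value, length)
--     for v in b:
--         if runs and runs[-1][0] == v:
--             runs[-1] = (v, runs[-1][1] + 1)
--         else:
--             runs.append((v, 1))
--     return max((n for v, n in runs if v), default=0)
-- ===== Notes on version B (the rewrite author's own statement) =====
-- stated objective: alternative
-- what changed: Replaces A's fused running-counter/reset scan with a two-phase decomposition: precompute the boolean table of adjacent non-increasing comparisons, run-length-encode it into groups, and take the maximum length among the True groups.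
import Mathlib
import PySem

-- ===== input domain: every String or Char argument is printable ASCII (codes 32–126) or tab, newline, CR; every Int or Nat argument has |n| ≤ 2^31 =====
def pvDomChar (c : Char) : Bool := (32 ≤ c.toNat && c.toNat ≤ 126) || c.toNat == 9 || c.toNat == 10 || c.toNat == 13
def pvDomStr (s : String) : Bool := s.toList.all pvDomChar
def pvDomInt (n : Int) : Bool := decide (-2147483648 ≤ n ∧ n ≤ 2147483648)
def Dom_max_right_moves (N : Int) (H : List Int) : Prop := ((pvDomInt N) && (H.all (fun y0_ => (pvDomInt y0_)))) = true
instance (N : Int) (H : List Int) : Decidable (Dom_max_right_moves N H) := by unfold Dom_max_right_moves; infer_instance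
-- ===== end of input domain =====

-- B re-derives the answer by a table-then-grouping decomposition (comparison table,
-- run-length encoding, max True-run length); same O(N) cost, different shape ("alternative").

-- ===== PORT A =====
def max_right_moves (N : Int) (H : List Int) : Int :=
  -- ans, x running state; H[i] accesses are in range under Pre_ (pyGetD default unreachable there)
  (((PySem.List.pyRange 0 (N - 1) 1).foldl
      (fun (p : Int × Int) i =>
        if PySem.List.pyGetD H i 0 ≥ PySem.List.pyGetD H (i + 1) 0 then
          (max p.1 (p.2 + 1), p.2 + 1)
        else (p.1, 0)) (0, 0))).1

-- ===== PORT B =====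
-- run-length-encoding step: extend the most recent run or open a new one
def pvBuild (rs : List (Bool × Int)) (v : Bool) : List (Bool × Int) :=
  match rs with
  | [] => [(v, 1)]
  | (c, n) :: rest => if v == c then (c, n + 1) :: rest else (v, 1) :: (c, n) :: rest

def max_right_moves_alt (N : Int) (H : List Int) : Int :=
  let b := (PySem.List.pyRange 0 (N - 1) 1).map
    (fun i => decide (PySem.List.pyGetD H i 0 ≥ PySem.List.pyGetD H (i + 1) 0))
  -- Python appends at the end; the fold prepends, so reverse to recover Python's run order
  let runs := (b.foldl pvBuild []).reverse
  runs.foldl (fun m p => if p.1 then max m p.2 else m) 0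

-- ===== PRECONDITION & SPEC =====
-- Pre_ excludes exactly the inputs where both Pythons raise IndexError: N ≥ 2 with N > len(H).
def Pre_max_right_moves (N : Int) (H : List Int) : Prop := N ≤ 1 ∨ N ≤ (H.length : Int)
instance (N : Int) (H : List Int) : Decidable (Pre_max_right_moves N H) := by
  unfold Pre_max_right_moves; infer_instance
def pvWitness_max_right_moves : Int × List Int := (4, [3, 3, 2, 5])

def Spec_max_right_moves (N : Int) (H : List Int) (out : Int) : Prop := out = max_right_moves_alt N H
instance (N : Int) (H : List Int) (out : Int) : Decidable (Spec_max_right_moves N H out) := by unfold Spec_max_right_moves; infer_instance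

-- ===== CLAIM (what is proved, stated in full; the proofs are below) =====
def Claim_equal_max_right_moves : Prop := ∀ (N : Int) (H : List Int), Dom_max_right_moves N H → Pre_max_right_moves N H → Spec_max_right_moves N H (max_right_moves N H)

-- ===== LEMMAS AND PROOFS =====

-- A's loop body, on the boolean comparison table
def pvStepA (p : Int × Int) (b : Bool) : Int × Int :=
  if b then (max p.1 (p.2 + 1), p.2 + 1) else (p.1, 0)

-- canonical value: max True-run length of bs, entering with a current run of length x
def pvH : Int → List Bool → Int
  | _, [] => 0
  | x, true :: bs => max (x + 1) (pvH (x + 1) bs)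
  | _, false :: bs => pvH 0 bs

-- run-length encoding, recursively (in order)
def pvRunsAux : Bool → Int → List Bool → List (Bool × Int)
  | c, n, [] => [(c, n)]
  | c, n, v :: bs => if v == c then pvRunsAux c (n + 1) bs else (c, n) :: pvRunsAux v 1 bs

theorem pvH_nonneg (bs : List Bool) : ∀ x : Int, 0 ≤ pvH x bs := by
  induction bs with
  | nil => intro x; simp [pvH]
  | cons v bs ih =>
    intro x; cases v <;> simp only [pvH]
    · exact ih 0
    · exact le_trans (ih (x + 1)) (le_max_right _ _)

theorem pvLemA (bs : List Bool) : ∀ ans x : Int, 0 ≤ x → x ≤ ans →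
    (bs.foldl pvStepA (ans, x)).1 = max ans (pvH x bs) := by
  induction bs with
  | nil => intro ans x hx hxa; simp [pvH]; omega
  | cons v bs ih =>
    intro ans x hx hxa
    cases v <;> simp only [pvStepA, List.foldl_cons, if_true, if_false, Bool.false_eq_true, pvH]
    · rw [ih ans 0 le_rfl (le_trans hx hxa)]
    · rw [ih (max ans (x + 1)) (x + 1) (by omega) (le_max_right _ _)]
      omega

theorem pvLemBuild (bs : List Bool) : ∀ (c : Bool) (n : Int) (acc : List (Bool × Int)),
    bs.foldl pvBuild ((c, n) :: acc) = (pvRunsAux c n bs).reverse ++ acc := by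
  induction bs with
  | nil => intro c n acc; simp [pvRunsAux]
  | cons v bs ih =>
    intro c n acc
    simp only [List.foldl_cons, pvBuild, pvRunsAux]
    by_cases h : v == c <;> simp [h, ih]

theorem pvLemTF (bs : List Bool) : ∀ (c : Bool) (n m : Int), 0 ≤ m → 1 ≤ n →
    ((pvRunsAux c n bs).foldl (fun m p => if p.1 then max m p.2 else m) m) =
      if c then max (max m n) (pvH n bs) else max m (pvH 0 bs) := by
  induction bs with
  | nil =>
    intro c n m hm hn
    cases c <;> simp [pvRunsAux, pvH] <;> omega
  | cons v bs ih =>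
    intro c n m hm hn
    cases v <;> cases c
    · -- v = false, c = false
      rw [show pvRunsAux false n (false :: bs) = pvRunsAux false (n + 1) bs from rfl,
        ih false (n + 1) m hm (by omega)]
      simp [pvH]
    · -- v = false, c = true
      rw [show pvRunsAux true n (false :: bs) = (true, n) :: pvRunsAux false 1 bs from rfl,
        List.foldl_cons]
      simp only [if_true]
      rw [ih false 1 (max m n) (by omega) le_rfl]
      simp [pvH]
    · -- v = true, c = false
      rw [show pvRunsAux false n (true :: bs) = (false, n) :: pvRunsAux true 1 bs from rfl,
        List.foldl_cons]
      simp only [Bool.false_eq_true, if_false]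
      rw [ih true 1 m hm le_rfl]
      simp only [if_true, pvH, zero_add]
      omega
    · -- v = true, c = true
      rw [show pvRunsAux true n (true :: bs) = pvRunsAux true (n + 1) bs from rfl,
        ih true (n + 1) m hm (by omega)]
      simp only [if_true, pvH]
      omega

-- A equals the canonical value on its comparison table
theorem pvA_eq (N : Int) (H : List Int) :
    max_right_moves N H =
      pvH 0 ((PySem.List.pyRange 0 (N - 1) 1).map
        (fun i => decide (PySem.List.pyGetD H i 0 ≥ PySem.List.pyGetD H (i + 1) 0))) := by
  unfold max_right_moves
  have h1 : (PySem.List.pyRange 0 (N - 1) 1).foldl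
      (fun (p : Int × Int) i =>
        if PySem.List.pyGetD H i 0 ≥ PySem.List.pyGetD H (i + 1) 0 then
          (max p.1 (p.2 + 1), p.2 + 1)
        else (p.1, 0)) (0, 0) =
      ((PySem.List.pyRange 0 (N - 1) 1).map
        (fun i => decide (PySem.List.pyGetD H i 0 ≥ PySem.List.pyGetD H (i + 1) 0))).foldl
        pvStepA (0, 0) := by
    rw [List.foldl_map]
    congr 1
    funext p i
    by_cases hc : PySem.List.pyGetD H i 0 ≥ PySem.List.pyGetD H (i + 1) 0 <;>
      simp [pvStepA, hc]
  rw [h1, pvLemA _ 0 0 le_rfl le_rfl]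
  have := pvH_nonneg ((PySem.List.pyRange 0 (N - 1) 1).map
    (fun i => decide (PySem.List.pyGetD H i 0 ≥ PySem.List.pyGetD H (i + 1) 0))) 0
  omega

-- B equals the canonical value on the same table
theorem pvB_eq (N : Int) (H : List Int) :
    max_right_moves_alt N H =
      pvH 0 ((PySem.List.pyRange 0 (N - 1) 1).map
        (fun i => decide (PySem.List.pyGetD H i 0 ≥ PySem.List.pyGetD H (i + 1) 0))) := by
  unfold max_right_moves_alt
  generalize (PySem.List.pyRange 0 (N - 1) 1).map
    (fun i => decide (PySem.List.pyGetD H i 0 ≥ PySem.List.pyGetD H (i + 1) 0)) = bs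
  cases bs with
  | nil => simp [pvH]
  | cons v bs =>
    simp only [List.foldl_cons, pvBuild]
    rw [pvLemBuild bs v 1 [], List.append_nil, List.reverse_reverse,
      pvLemTF bs v 1 0 le_rfl le_rfl]
    cases v
    · simp only [Bool.false_eq_true, if_false, pvH]
      have := pvH_nonneg bs 0; omega
    · simp only [if_true, pvH, zero_add]
      omega

-- ===== VERDICT (by name: the statement is the Claim_ definition above) =====
theorem max_right_moves_spec : Claim_equal_max_right_moves := by
  intro N H _ _
  unfold Spec_max_right_moves
  rw [pvA_eq, pvB_eq]
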